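-- pv_equiv track=rewrite | github.com/kimseojeong6533/CodingTest_python | 백준_신입사원.py | func
-- ===== SOURCE A (Python) =====
-- def func(lst):
--
--     lst.sort(key=lambda x: (x[0]))
--     lst2 = [x[1] for x in lst]
--     c = lst2[0]
--     ans = [c]
--     for i in range(1,len(lst2)):
--         if c > lst2[i]:
--             ans.append(lst2[i])
--             c=lst2[i]
--     return ans
-- ===== SOURCE B (Python) =====
-- def func(lst):
--     # Same side effect as A: sorts lst in place by first component.
--     lst.sort(key=lambda x: (x[0]))
--
--     def g(xs):
--         # first element always wins; only strictly smaller later elements can win,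
--         # so recurse on the filtered remainder.
--         c = xs[0]
--         rest = [v for v in xs[1:] if v < c]
--         return [c] if not rest else [c] + g(rest)
--
--     return g([x[1] for x in lst])
-- ===== Notes on version B (the rewrite author's own statement) =====
-- stated objective: alternative
-- what changed: B replaces A's single left-to-right running-minimum scan by a recursive filter-and-recurse decomposition: take the head, discard every later element not strictly smaller than it, and recurse on the filtered remainder; no running minimum is maintained.
import Mathlib
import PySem

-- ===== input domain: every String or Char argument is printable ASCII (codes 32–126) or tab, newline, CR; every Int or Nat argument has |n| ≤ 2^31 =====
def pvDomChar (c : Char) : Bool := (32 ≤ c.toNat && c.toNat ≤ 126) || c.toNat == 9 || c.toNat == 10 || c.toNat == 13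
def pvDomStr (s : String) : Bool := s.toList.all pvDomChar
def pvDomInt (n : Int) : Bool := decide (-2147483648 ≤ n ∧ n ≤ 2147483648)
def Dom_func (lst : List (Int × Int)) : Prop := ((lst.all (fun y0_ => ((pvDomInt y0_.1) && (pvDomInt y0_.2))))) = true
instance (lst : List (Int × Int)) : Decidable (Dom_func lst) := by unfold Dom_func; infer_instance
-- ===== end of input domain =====

-- B replaces A's running-minimum scan by a filter-and-recurse decomposition (objective:
-- alternative). Both Pythons sort lst in place by the first component — the side effect is
-- identical in A and B; the equivalence proved is about the return value.

-- ===== PORT A =====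
-- A's body after the sort: c = lst2[0] (raises IndexError on []), then the running-min loop.
def funcGo : List Int → List Int
  | [] => []   -- lst2[0] raises IndexError in Python; excluded by Pre_func
  | c0 :: rest =>
    (rest.foldl (fun (st : Int × List Int) x =>
        if st.1 > x then (x, st.2 ++ [x]) else st) (c0, [c0])).2

def func (lst : List (Int × Int)) : List Int :=
  funcGo ((PySem.List.sorted lst (fun x => x.1)).map Prod.snd)

-- ===== PORT B =====
-- B's helper g: c = xs[0] (raises IndexError on []); rest = [v for v in xs[1:] if v < c];
-- return [c] if not rest else [c] + g(rest).
def altGo : List Int → List Int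
  | [] => []   -- xs[0] raises IndexError in Python; excluded by Pre_func
  | c :: xs =>
    let r := xs.filter (fun v => decide (v < c))
    if r = [] then [c] else c :: altGo r
termination_by l => l.length
decreasing_by
  simp only [List.length_cons, List.length_unattach]
  have h := List.length_filter_le (fun (x : {x // x ∈ xs}) => decide ((x : Int) < c)) xs.attach
  simp only [List.length_attach] at h
  exact Nat.lt_succ_of_le h

def func_alt (lst : List (Int × Int)) : List Int :=
  altGo ((PySem.List.sorted lst (fun x => x.1)).map Prod.snd)

-- ===== PRECONDITION & SPEC =====
-- Pre_ excludes only the empty list, on which both Pythons raise IndexError.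
def Pre_func (lst : List (Int × Int)) : Prop := lst ≠ []
instance (lst : List (Int × Int)) : Decidable (Pre_func lst) := by unfold Pre_func; infer_instance
def pvWitness_func : (List (Int × Int)) := [(1, 2)]

def Spec_func (lst : List (Int × Int)) (out : List Int) : Prop := out = func_alt lst
instance (lst : List (Int × Int)) (out : List Int) : Decidable (Spec_func lst out) := by unfold Spec_func; infer_instance

-- ===== CLAIM (what is proved, stated in full; the proofs are below) =====
def Claim_equal_func : Prop := ∀ (lst : List (Int × Int)), Dom_func lst → Pre_func lst → Spec_func lst (func lst)

-- ===== LEMMAS AND PROOFS =====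

-- A's loop as structural recursion (the values appended after the seed [c0]).
def loopA (c : Int) : List Int → List Int
  | [] => []
  | x :: xs => if c > x then x :: loopA x xs else loopA c xs

lemma foldlA_eq (rest : List Int) : ∀ (c : Int) (acc : List Int),
    (rest.foldl (fun (st : Int × List Int) x =>
        if st.1 > x then (x, st.2 ++ [x]) else st) (c, acc)).2 = acc ++ loopA c rest := by
  induction rest with
  | nil => intro c acc; simp [loopA]
  | cons x xs ih =>
    intro c acc
    simp only [List.foldl_cons, loopA]
    by_cases h : c > x
    · simp [h, ih]
    · simp [h, ih]

-- Core: A's running-minimum loop equals B's filter-and-recurse on the tail.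
lemma loopA_eq_alt (xs : List Int) : ∀ c : Int,
    loopA c xs = (if xs.filter (fun v => decide (v < c)) = [] then []
                  else altGo (xs.filter (fun v => decide (v < c)))) := by
  induction xs with
  | nil => intro c; simp [loopA]
  | cons x xs ih =>
    intro c
    by_cases h : x < c
    · have hf : (x :: xs).filter (fun v => decide (v < c))
          = x :: xs.filter (fun v => decide (v < c)) := by simp [h]
      -- inner filter by (< x) absorbs the outer filter by (< c) since x < c
      have habs : (xs.filter (fun v => decide (v < c))).filter (fun v => decide (v < x))
          = xs.filter (fun v => decide (v < x)) := by
        rw [List.filter_filter]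
        refine List.filter_congr ?_
        intro v _
        by_cases hv : v < x
        · simp [hv, lt_trans hv h]
        · simp [hv]
      rw [hf]
      simp only [loopA, gt_iff_lt, h, if_true, reduceCtorEq, if_false]
      rw [altGo, habs, ih x]
      split_ifs <;> rfl
    · have hf : (x :: xs).filter (fun v => decide (v < c))
          = xs.filter (fun v => decide (v < c)) := by simp [h]
      rw [hf]
      simp only [loopA, gt_iff_lt, h, if_false]
      exact ih c

lemma go_eq : ∀ (L : List Int), funcGo L = altGo L
  | [] => by rw [funcGo, altGo]
  | c0 :: rest => by
    simp only [funcGo]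
    rw [foldlA_eq, altGo, loopA_eq_alt rest c0]
    split_ifs <;> simp

-- ===== VERDICT (by name: the statement is the Claim_ definition above) =====
theorem func_spec : Claim_equal_func := by
  intro lst _ _
  unfold Spec_func func func_alt
  exact go_eq _
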